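-- pv_equiv track=rewrite | github.com/edenai/edenai-apis | edenai_apis/utils/conversion.py | closest_above_value
-- ===== SOURCE A (Python) =====
-- def closest_above_value(input_list, input_value):
--     try:
--         above = min(
--             [i for i in input_list if i >= input_value] or input_list,
--             key=lambda x: abs(x - input_value),
--         )
--     except ValueError:
--         above = -1
--     return above
-- ===== SOURCE B (Python) =====
-- def closest_above_value(input_list, input_value):
--     # Sort-then-scan: stable sort by abs distance, then the first element >= input_value
--     # is the tie-respecting minimum of the 'above' candidates; fallback = overall closest = head.
--     ranked = sorted(input_list, key=lambda x: abs(x - input_value))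
--     for x in ranked:
--         if x >= input_value:
--             return x
--     return ranked[0] if ranked else -1
-- ===== Notes on version B (the rewrite author's own statement) =====
-- stated objective: alternative
-- what changed: Replaces filter + min(key) + or-fallback with a sort-then-scan: stable-sort the list by abs distance once, return the first element >= input_value in that ranking (stability reproduces min's first-on-tie choice), else the head of the ranking, else -1.
import Mathlib
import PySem

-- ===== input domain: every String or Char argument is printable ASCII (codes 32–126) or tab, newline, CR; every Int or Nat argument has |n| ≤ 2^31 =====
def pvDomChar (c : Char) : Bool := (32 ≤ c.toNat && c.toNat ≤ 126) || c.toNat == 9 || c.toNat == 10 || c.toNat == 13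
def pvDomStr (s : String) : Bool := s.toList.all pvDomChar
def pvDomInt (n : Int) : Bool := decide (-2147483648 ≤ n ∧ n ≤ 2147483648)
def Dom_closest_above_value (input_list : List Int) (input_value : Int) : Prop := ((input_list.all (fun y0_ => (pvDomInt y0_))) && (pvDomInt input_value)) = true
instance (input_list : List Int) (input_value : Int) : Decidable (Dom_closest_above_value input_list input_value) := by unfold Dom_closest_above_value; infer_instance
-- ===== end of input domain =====

-- B replaces A's filter + min(key) + or-fallback with a stable sort by abs distance followed by a scan for the first element >= input_value (alternative decomposition).

-- ===== PORT A =====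
-- A: min over the filtered list (or the whole list when the filter is empty) by abs distance; ValueError (empty) → -1.
def closest_above_value (input_list : List Int) (input_value : Int) : Int :=
  let filtered := input_list.filter (fun i => decide (input_value ≤ i))
  let pool := if filtered.isEmpty then input_list else filtered
  match PySem.List.min? pool (fun x => |x - input_value|) with
  | some m => m
  | none => -1

-- ===== PORT B =====
-- B: stable sort by abs distance; the scan-with-early-return is List.find?; else ranked[0] if ranked else -1.
def closest_above_value_alt (input_list : List Int) (input_value : Int) : Int :=
  let ranked := PySem.List.sorted input_list (fun x => |x - input_value|)
  match ranked.find? (fun x => decide (input_value ≤ x)) with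
  | some x => x
  | none =>
    match ranked with
    | [] => -1
    | h :: _ => h

-- ===== PRECONDITION & SPEC =====
def Spec_closest_above_value (input_list : List Int) (input_value : Int) (out : Int) : Prop := out = closest_above_value_alt input_list input_value
instance (input_list : List Int) (input_value : Int) (out : Int) : Decidable (Spec_closest_above_value input_list input_value out) := by unfold Spec_closest_above_value; infer_instance

-- ===== CLAIM (what is proved, stated in full; the proofs are below) =====
def Claim_equal_closest_above_value : Prop := ∀ (input_list : List Int) (input_value : Int), Dom_closest_above_value input_list input_value → Spec_closest_above_value input_list input_value (closest_above_value input_list input_value)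

-- ===== LEMMAS AND PROOFS =====

-- min?'s fold step (a new accumulator only on a strictly smaller key: first extremal wins)
def cavStep (k : Int → Int) (acc : Option Int) (x : Int) : Option Int :=
  match acc with
  | none => some x
  | some m => if k x < k m then some x else some m

lemma cav_min?_eq_fold (k : Int → Int) (xs : List Int) :
    PySem.List.min? xs k = xs.foldl (cavStep k) none := by
  simp only [PySem.List.min?]
  apply List.foldl_ext
  intro a x _
  cases a <;> simp [cavStep]

-- inserting x into a key-sorted list: the first p-element either stays or is beaten by x on a strictly smaller key
lemma cav_find?_insertBy (k : Int → Int) (p : Int → Bool) (x : Int) :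
    ∀ (ys : List Int), ys.Pairwise (fun a b => k a ≤ k b) →
      (PySem.List.insertBy (fun a b => decide (k a < k b)) x ys).find? p =
        if p x then cavStep k (ys.find? p) x else ys.find? p := by
  intro ys
  induction ys with
  | nil =>
    intro _
    by_cases hp : p x <;> simp [PySem.List.insertBy, List.find?, hp, cavStep]
  | cons y t ih =>
    intro hpw
    have hyt : ∀ z ∈ t, k y ≤ k z := fun z hz => List.rel_of_pairwise_cons hpw hz
    have htp : t.Pairwise (fun a b => k a ≤ k b) := hpw.of_cons
    by_cases hlt : k x < k y
    · -- x goes in front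
      have hm : ∀ m, (y :: t).find? p = some m → k y ≤ k m := by
        intro m hf
        have := List.mem_of_find?_eq_some hf
        rcases List.mem_cons.mp this with h | h
        · exact le_of_eq (congrArg k h.symm)
        · exact hyt m h
      by_cases hp : p x
      · cases hfo : (y :: t).find? p with
        | none => simp [PySem.List.insertBy, hlt, hp, cavStep]
        | some m =>
          have : k x < k m := lt_of_lt_of_le hlt (hm m hfo)
          simp [PySem.List.insertBy, hlt, hp, cavStep, this]
      · simp [PySem.List.insertBy, hlt, List.find?, hp]
    · -- x goes after y: y :: insertBy x t
      by_cases hpy : p y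
      · by_cases hp : p x
        · have hyx : k y ≤ k x := not_lt.mp hlt
          simp [PySem.List.insertBy, hlt, List.find?, hpy, hp, cavStep]
        · simp [PySem.List.insertBy, hlt, List.find?, hpy, hp]
      · have := ih htp
        by_cases hp : p x <;>
          simp [PySem.List.insertBy, hlt, List.find?, hpy, hp, this, cavStep]

-- sorting one more element at the right end is one insertBy into the sorted prefix
lemma cav_sorted_append (k : Int → Int) (ys : List Int) (x : Int) :
    PySem.List.sorted (ys ++ [x]) k =
      PySem.List.insertBy (fun a b => decide (k a < k b)) x (PySem.List.sorted ys k) := by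
  rw [PySem.List.sorted_eq_foldl_insertBy, PySem.List.sorted_eq_foldl_insertBy, List.foldl_append]
  rfl

-- the core: scanning the sorted list for the first p-element IS min?'s fold over the filtered list
lemma cav_find?_sorted (k : Int → Int) (p : Int → Bool) (xs : List Int) :
    (PySem.List.sorted xs k).find? p = (xs.filter p).foldl (cavStep k) none := by
  induction xs using List.reverseRecOn with
  | nil => simp [PySem.List.sorted_eq_foldl_insertBy]
  | append_singleton ys x ih =>
    rw [cav_sorted_append,
      cav_find?_insertBy k p x (PySem.List.sorted ys k) (PySem.List.sorted_pairwise ys k),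
      List.filter_append, List.foldl_append, ih]
    by_cases hp : p x <;> simp [hp, cavStep]

-- ranked is empty exactly when xs is (cite sorted_eq_nil_iff)
-- and find? with the always-true predicate is head?
lemma cav_find?_true (l : List Int) : l.find? (fun _ => true) = l.head? := by
  cases l <;> simp [List.find?]

-- ===== VERDICT (by name: the statement is the Claim_ definition above) =====
theorem closest_above_value_spec : Claim_equal_closest_above_value := by
  intro xs v _
  show closest_above_value xs v = closest_above_value_alt xs v
  simp only [closest_above_value, closest_above_value_alt]
  set k := fun x : Int => |x - v| with hk
  set p := fun x : Int => decide (v ≤ x) with hp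
  have hfind := cav_find?_sorted k p xs
  by_cases hf : xs.filter p = []
  · -- no element ≥ v: A falls back to the whole list, B to ranked's head
    rw [hfind, hf]
    simp only [List.isEmpty_nil, if_true, List.foldl_nil]
    have hhead : (PySem.List.sorted xs k).head? = xs.foldl (cavStep k) none := by
      rw [← cav_find?_true, cav_find?_sorted k (fun _ => true) xs, List.filter_true]
    rw [cav_min?_eq_fold, ← hhead]
    cases hs : PySem.List.sorted xs k with
    | nil =>
      have : xs = [] := (PySem.List.sorted_eq_nil_iff xs k false).mp hs
      subst this
      simp at hs ⊢
    | cons h t => simp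
  · -- some element ≥ v: A's min over the filter, B's first hit in the ranking
    have hne : (xs.filter p).isEmpty = false := by simpa [List.isEmpty_iff] using hf
    rw [hfind, hne]
    simp only [Bool.false_eq_true, if_false]
    rw [cav_min?_eq_fold]
    cases hmo : (xs.filter p).foldl (cavStep k) none with
    | none =>
      exfalso
      apply hf
      have : PySem.List.min? (xs.filter p) k = none := by rw [cav_min?_eq_fold]; exact hmo
      exact (PySem.List.min?_eq_none_iff _ _).mp this
    | some m => rfl
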